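-- pv_equiv track=rewrite | github.com/nlpgirl/collocations_tatar | colloc_extr.py | find_collocations
-- ===== SOURCE A (Python) =====
-- from collections import defaultdict
-- from collections import defaultdict
-- from collections import defaultdict
--
-- def find_collocations(corpus, target_noun, window_size=1):
--     """
--     Находит коллокации для заданного существительного по шаблону "прилагательное+существительное"
--
--     Параметры:
--     - corpus: список предложений с леммами и частями речи
--     - target_noun: целевое существительное (в лемматизированной форме)
--     - window_size: размер контекстного окна
--
--     Возвращает:
--     - unigrams: словарь частот прилагательных
--     - collocations: словарь частот биграмм (прилагательное, существительное)
--     """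
--
--     unigrams = defaultdict(int)
--     collocations = defaultdict(int)
--
--     target_noun = target_noun.lower().strip()
--
--     for sentence in corpus:
--         for i, (lemma, pos) in enumerate(sentence):
--             unigrams[lemma] += 1
--             # Ищем целевое существительное
--             if lemma == target_noun and pos == 'n':
--                 # Проверяем окно слева
--                 start = max(0, i - window_size)
--                 for j in range(start, i):
--                     colloc_lemma, colloc_pos = sentence[j]
--
--                     # Проверка условий:
--                     # 1. Часть речи - прилагательное
--                     # 2. Соответствует шаблону "adj + noun"
--                     if (colloc_pos == 'adj'):
--                         collocations[colloc_lemma] += 1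
--
--
--     return dict(unigrams), dict(collocations)
-- ===== SOURCE B (Python) =====
-- def _lemmas_of(sentence):
--     return [lemma for (lemma, pos) in sentence]
--
--
-- def _count(items):
--     counts = {}
--     for x in items:
--         counts[x] = counts.get(x, 0) + 1
--     return counts
--
--
-- def _adj_events(sentence, target, window_size):
--     """Lemma of each adjective, once per target-noun occurrence in its right window."""
--     out = []
--     if window_size > 0:
--         for j, (lemma, pos) in enumerate(sentence):
--             if pos == 'adj':
--                 for (noun_lemma, noun_pos) in sentence[j + 1: j + 1 + window_size]:
--                     if noun_lemma == target and noun_pos == 'n':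
--                         out.append(lemma)
--     return out
--
--
-- def find_collocations(corpus, target_noun, window_size=1):
--     """Staged variant: flatten the corpus into event streams, then count them.
--     Collocations are driven from each adjective over its right window (slice),
--     enumerating the same (adjective, noun) pairs as A's noun-driven left scan."""
--     target = target_noun.lower().strip()
--     unigrams = _count(l for sentence in corpus for l in _lemmas_of(sentence))
--     collocations = _count(e for sentence in corpus
--                           for e in _adj_events(sentence, target, window_size))
--     return unigrams, collocations
-- ===== Notes on version B (the rewrite author's own statement) =====
-- stated objective: alternative
-- what changed: B is staged instead of one nested stateful pass: it flattens the corpus into two event streams (all lemmas; one adjective-lemma event per target noun found in a clamped right-window slice after each adjective, the reverse of A's left-window scan from each noun occurrence) and then counts each stream with a generic counting helper, replacing A's in-loop defaultdict updates.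
import Mathlib
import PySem

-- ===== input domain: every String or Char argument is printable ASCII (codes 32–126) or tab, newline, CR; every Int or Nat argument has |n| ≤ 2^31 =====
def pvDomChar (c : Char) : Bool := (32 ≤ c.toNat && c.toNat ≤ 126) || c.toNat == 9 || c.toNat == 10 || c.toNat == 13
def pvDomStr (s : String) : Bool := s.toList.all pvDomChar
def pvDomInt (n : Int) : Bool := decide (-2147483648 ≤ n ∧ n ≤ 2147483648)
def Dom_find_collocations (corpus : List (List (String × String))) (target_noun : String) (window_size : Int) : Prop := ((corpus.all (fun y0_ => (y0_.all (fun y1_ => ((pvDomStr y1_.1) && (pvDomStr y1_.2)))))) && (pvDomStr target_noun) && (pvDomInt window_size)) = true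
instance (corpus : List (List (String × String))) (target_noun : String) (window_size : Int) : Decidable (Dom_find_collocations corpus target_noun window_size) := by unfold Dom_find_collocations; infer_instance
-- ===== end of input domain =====

-- B is staged: it flattens the corpus into two event streams (all lemmas; one adjective event per
-- target noun in the right-window slice after the adjective) and counts each with a generic
-- counting helper — an alternative decomposition of A's single nested stateful pass, same cost.

-- ===== PORT A =====
-- A: one pass; on each target-noun occurrence, scan the left window for adjectives.
def find_collocations (corpus : List (List (String × String))) (target_noun : String) (window_size : Int) : (List (String × Int)) × (List (String × Int)) :=
  let target := PySem.Str.strip (PySem.Str.lower target_noun)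
  let res := corpus.foldl (fun (st : PySem.Dict String Int × PySem.Dict String Int) sentence =>
      (PySem.List.enumerate sentence).foldl (fun st2 ip =>
        (st2.1.insert ip.2.1 (st2.1.getD ip.2.1 0 + 1),
         if ip.2.1 = target ∧ ip.2.2 = "n" then
           (PySem.List.pyRange (max 0 (ip.1 - window_size)) ip.1).foldl (fun c j =>
             match PySem.List.pyGet? sentence j with
             | some q => if q.2 = "adj" then c.insert q.1 (c.getD q.1 0 + 1) else c
             | none => c) st2.2
         else st2.2)) st) (PySem.Dict.empty, PySem.Dict.empty)
  (res.1.items, res.2.items)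

-- ===== PORT B =====
-- B-side helpers (Source B's _lemmas_of, _count, _adj_events)
def pvLemmasOf (sentence : List (String × String)) : List String :=
  sentence.map (fun p => p.1)

def pvCountOf (items : List String) : PySem.Dict String Int :=
  items.foldl (fun counts x => counts.insert x (counts.getD x 0 + 1)) PySem.Dict.empty

def pvAdjEvents (sentence : List (String × String)) (target : String) (window_size : Int) : List String :=
  if 0 < window_size then
    (PySem.List.enumerate sentence).flatMap (fun jp =>
      if jp.2.2 = "adj" then
        (PySem.List.slice sentence (some (jp.1 + 1)) (some (jp.1 + 1 + window_size))).filterMap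
          (fun q => if q.1 = target ∧ q.2 = "n" then some jp.2.1 else none)
      else [])
  else []

-- B: flatten into event streams, then count them.
def find_collocations_alt (corpus : List (List (String × String))) (target_noun : String) (window_size : Int) : (List (String × Int)) × (List (String × Int)) :=
  let target := PySem.Str.strip (PySem.Str.lower target_noun)
  let unigrams := pvCountOf (corpus.flatMap pvLemmasOf)
  let collocations := pvCountOf (corpus.flatMap (fun sentence => pvAdjEvents sentence target window_size))
  (unigrams.items, collocations.items)

-- ===== PRECONDITION & SPEC =====
def Spec_find_collocations (corpus : List (List (String × String))) (target_noun : String) (window_size : Int) (out : (List (String × Int)) × (List (String × Int))) : Prop := out = find_collocations_alt corpus target_noun window_size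
instance (corpus : List (List (String × String))) (target_noun : String) (window_size : Int) (out : (List (String × Int)) × (List (String × Int))) : Decidable (Spec_find_collocations corpus target_noun window_size out) := by unfold Spec_find_collocations; infer_instance

-- ===== CLAIM (what is proved, stated in full; the proofs are below) =====
def Claim_equal_find_collocations : Prop := ∀ (corpus : List (List (String × String))) (target_noun : String) (window_size : Int), Dom_find_collocations corpus target_noun window_size → Spec_find_collocations corpus target_noun window_size (find_collocations corpus target_noun window_size)

-- ===== LEMMAS AND PROOFS =====

-- Abbreviations (proof-side only).
def pvLem (s : List (String × String)) (j : Int) : String := (PySem.List.pyGetD s j ("", "")).1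
def pvPos (s : List (String × String)) (j : Int) : String := (PySem.List.pyGetD s j ("", "")).2
def pvCnt (d : PySem.Dict String Int) (es : List String) : PySem.Dict String Int :=
  es.foldl (fun d k => d.insert k (d.getD k 0 + 1)) d

-- Event lists (the keys each side's collocation counting bumps, in that side's order).
def pvInnerA (t : String) (ws : Int) (s : List (String × String)) (ip : Int × (String × String)) : List String :=
  if ip.2.1 = t ∧ ip.2.2 = "n" then
    (PySem.List.pyRange (max 0 (ip.1 - ws)) ip.1).filterMap (fun j =>
      match PySem.List.pyGet? s j with
      | some q => if q.2 = "adj" then some q.1 else none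
      | none => none)
  else []
def pvEvA (t : String) (ws : Int) (s : List (String × String)) : List String :=
  (PySem.List.enumerate s).flatMap (pvInnerA t ws s)

def pvInnerB (t : String) (ws : Int) (s : List (String × String)) (jp : Int × (String × String)) : List String :=
  if jp.2.2 = "adj" then
    (PySem.List.pyRange (jp.1 + 1) (min (PySem.List.len s) (jp.1 + 1 + ws))).filterMap (fun i =>
      match PySem.List.pyGet? s i with
      | some q => if q.1 = t ∧ q.2 = "n" then some jp.2.1 else none
      | none => none)
  else []
def pvEvB (t : String) (ws : Int) (s : List (String × String)) : List String :=
  (PySem.List.enumerate s).flatMap (pvInnerB t ws s)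

-- Pair lists: the (adjective position, noun position) pairs each side enumerates, in its order.
def pvPsA (t : String) (ws : Int) (s : List (String × String)) : List (Int × Int) :=
  (PySem.List.enumerate s).flatMap (fun ip =>
    if ip.2.1 = t ∧ ip.2.2 = "n" then
      ((PySem.List.pyRange (max 0 (ip.1 - ws)) ip.1).filter (fun j => pvPos s j == "adj")).map (fun j => (j, ip.1))
    else [])
def pvPsB (t : String) (ws : Int) (s : List (String × String)) : List (Int × Int) :=
  (PySem.List.enumerate s).flatMap (fun jp =>
    if jp.2.2 = "adj" then
      ((PySem.List.pyRange (jp.1 + 1) (min (PySem.List.len s) (jp.1 + 1 + ws))).filter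
        (fun i => pvLem s i == t && pvPos s i == "n")).map (fun i => (jp.1, i))
    else [])

def pvPairP (t : String) (ws : Int) (s : List (String × String)) (j i : Int) : Prop :=
  0 ≤ j ∧ j < i ∧ i < (s.length : Int) ∧ i ≤ j + ws ∧
    pvPos s j = "adj" ∧ pvLem s i = t ∧ pvPos s i = "n"

def pvLexA (p q : Int × Int) : Prop := p.2 < q.2 ∨ (p.2 = q.2 ∧ p.1 < q.1)
def pvLexB (p q : Int × Int) : Prop := p.1 < q.1 ∨ (p.1 = q.1 ∧ p.2 < q.2)

-- "first occurrence of a is strictly before any occurrence of b"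
def pvPrec {α : Type} : List α → α → α → Prop
  | [], _, _ => False
  | x :: xs, a, b => x = a ∨ (x ≠ b ∧ pvPrec xs a b)

-- ---- generic facts ----
lemma pvPrec_asymm {α : Type} {xs : List α} {a b : α} (hab : a ≠ b)
    (h1 : pvPrec xs a b) (h2 : pvPrec xs b a) : False := by
  induction xs with
  | nil => exact h1
  | cons x xs ih =>
      rcases h1 with h1 | ⟨hx1, h1⟩
      · rcases h2 with h2 | ⟨hx2, _⟩
        · exact hab (h1 ▸ h2.symm ▸ rfl)
        · exact hx2 h1
      · rcases h2 with h2 | ⟨_, h2⟩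
        · exact hx1 h2
        · exact ih h1 h2

lemma pvMem_enum (s : List (String × String)) (ip : Int × (String × String)) :
    ip ∈ PySem.List.enumerate s ↔
      0 ≤ ip.1 ∧ ip.1 < (s.length : Int) ∧ ip.2 = PySem.List.pyGetD s ip.1 ("", "") := by
  rw [PySem.List.enumerate_eq_map_pyRange s ("", ""), List.mem_map]
  constructor
  · rintro ⟨j, hj, rfl⟩
    rw [PySem.List.mem_pyRange_one] at hj
    simp only [PySem.List.len_eq] at hj
    exact ⟨hj.1, hj.2, rfl⟩
  · rintro ⟨h0, h1, h2⟩
    refine ⟨ip.1, ?_, ?_⟩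
    · rw [PySem.List.mem_pyRange_one]; simp only [PySem.List.len_eq]; exact ⟨h0, h1⟩
    · rw [← h2]

lemma pvGet_eq (s : List (String × String)) (j : Int) (h0 : 0 ≤ j) (h1 : j < (s.length : Int)) :
    PySem.List.pyGet? s j = some (PySem.List.pyGetD s j ("", "")) := by
  rw [PySem.List.pyGet?_of_nonneg _ h0, PySem.List.pyGetD_of_nonneg _ _ h0]
  rw [List.getElem?_eq_getElem (by omega), List.getD_eq_getElem _ _ (by omega)]

-- the filterMap body over in-range indices is a filter-then-map
lemma pvInner_eq (s : List (String × String)) (js : List Int) (F : String × String → Option String)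
    (p : Int → Bool) (g : Int → String)
    (h : ∀ j ∈ js, ∃ q, PySem.List.pyGet? s j = some q ∧ F q = if p j then some (g j) else none) :
    js.filterMap (fun j => match PySem.List.pyGet? s j with
      | some q => F q
      | none => none) = (js.filter p).map g := by
  induction js with
  | nil => rfl
  | cons j js ih =>
      obtain ⟨q, hq, hF⟩ := h j (List.mem_cons_self)
      rw [List.filterMap_cons, List.filter_cons, hq]
      simp only []
      rw [hF]
      by_cases hp : p j
      · simp only [hp, if_true, List.map_cons, ih (fun x hx => h x (List.mem_cons_of_mem _ hx))]
      · simp only [hp, if_false, Bool.false_eq_true, ih (fun x hx => h x (List.mem_cons_of_mem _ hx))]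

lemma pvEvA_eq_map (t : String) (ws : Int) (s : List (String × String)) :
    pvEvA t ws s = (pvPsA t ws s).map (fun p => pvLem s p.1) := by
  unfold pvEvA pvPsA pvInnerA
  rw [List.map_flatMap]
  apply List.flatMap_congr
  intro ip hip
  rw [pvMem_enum] at hip
  by_cases hc : ip.2.1 = t ∧ ip.2.2 = "n"
  · rw [if_pos hc, if_pos hc, List.map_map]
    apply pvInner_eq
    intro j hj
    rw [PySem.List.mem_pyRange_one] at hj
    have h0 : (0:Int) ≤ j := le_trans (le_max_left _ _) hj.1
    have h1 : j < (s.length : Int) := lt_trans hj.2 hip.2.1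
    refine ⟨PySem.List.pyGetD s j ("", ""), pvGet_eq s j h0 h1, ?_⟩
    simp only [Function.comp, pvPos, pvLem, beq_iff_eq]
  · rw [if_neg hc, if_neg hc]; rfl

lemma pvEvB_eq_map (t : String) (ws : Int) (s : List (String × String)) :
    pvEvB t ws s = (pvPsB t ws s).map (fun p => pvLem s p.1) := by
  unfold pvEvB pvPsB pvInnerB
  rw [List.map_flatMap]
  apply List.flatMap_congr
  intro jp hjp
  rw [pvMem_enum] at hjp
  by_cases hc : jp.2.2 = "adj"
  · rw [if_pos hc, if_pos hc, List.map_map]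
    apply pvInner_eq
    intro i hi
    rw [PySem.List.mem_pyRange_one] at hi
    simp only [PySem.List.len_eq] at hi
    have h0 : (0:Int) ≤ i := le_trans (by omega) hi.1
    have h1 : i < (s.length : Int) := by omega
    refine ⟨PySem.List.pyGetD s i ("", ""), pvGet_eq s i h0 h1, ?_⟩
    have hkey : jp.2.1 = (PySem.List.pyGetD s jp.1 ("", "")).1 := congrArg Prod.fst hjp.2.2
    simp only [Function.comp, pvPos, pvLem, beq_iff_eq, Bool.and_eq_true]
    by_cases ha : (PySem.List.pyGetD s i ("", "")).1 = t ∧ (PySem.List.pyGetD s i ("", "")).2 = "n"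
    · simp only [ha.1, ha.2, and_self, if_true]
      exact congrArg some hkey
    · rw [if_neg ha, if_neg (by simpa using ha)]
  · rw [if_neg hc, if_neg hc]; rfl

lemma pvMem_psA (t : String) (ws : Int) (s : List (String × String)) (p : Int × Int) :
    p ∈ pvPsA t ws s ↔ pvPairP t ws s p.1 p.2 := by
  unfold pvPsA pvPairP
  rw [List.mem_flatMap]
  constructor
  · rintro ⟨ip, hip, hp⟩
    rw [pvMem_enum] at hip
    by_cases hc : ip.2.1 = t ∧ ip.2.2 = "n"
    · rw [if_pos hc] at hp
      rw [List.mem_map] at hp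
      obtain ⟨j, hj, rfl⟩ := hp
      rw [List.mem_filter, PySem.List.mem_pyRange_one] at hj
      have hl : pvLem s ip.1 = ip.2.1 := (congrArg Prod.fst hip.2.2).symm
      have hpo : pvPos s ip.1 = ip.2.2 := (congrArg Prod.snd hip.2.2).symm
      refine ⟨by omega, by omega, hip.2.1, by omega, ?_, ?_, ?_⟩
      · exact beq_iff_eq.mp hj.2
      · rw [hl]; exact hc.1
      · rw [hpo]; exact hc.2
    · rw [if_neg hc] at hp
      exact absurd hp (List.not_mem_nil)
  · rintro ⟨h0, h1, h2, h3, h4, h5, h6⟩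
    refine ⟨(p.2, PySem.List.pyGetD s p.2 ("", "")), ?_, ?_⟩
    · rw [pvMem_enum]; exact ⟨by omega, h2, rfl⟩
    · rw [if_pos ⟨h5, h6⟩, List.mem_map]
      refine ⟨p.1, ?_, rfl⟩
      rw [List.mem_filter, PySem.List.mem_pyRange_one]
      exact ⟨⟨by omega, h1⟩, beq_iff_eq.mpr h4⟩

lemma pvMem_psB (t : String) (ws : Int) (s : List (String × String)) (p : Int × Int) :
    p ∈ pvPsB t ws s ↔ pvPairP t ws s p.1 p.2 := by
  unfold pvPsB pvPairP
  rw [List.mem_flatMap]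
  constructor
  · rintro ⟨jp, hjp, hp⟩
    rw [pvMem_enum] at hjp
    by_cases hc : jp.2.2 = "adj"
    · rw [if_pos hc] at hp
      rw [List.mem_map] at hp
      obtain ⟨i, hi, rfl⟩ := hp
      rw [List.mem_filter, PySem.List.mem_pyRange_one] at hi
      simp only [PySem.List.len_eq, Bool.and_eq_true, beq_iff_eq] at hi
      have hpo : pvPos s jp.1 = jp.2.2 := (congrArg Prod.snd hjp.2.2).symm
      refine ⟨by omega, by omega, by omega, by omega, ?_, hi.2.1, hi.2.2⟩
      rw [hpo]; exact hc
    · rw [if_neg hc] at hp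
      exact absurd hp (List.not_mem_nil)
  · rintro ⟨h0, h1, h2, h3, h4, h5, h6⟩
    refine ⟨(p.1, PySem.List.pyGetD s p.1 ("", "")), ?_, ?_⟩
    · rw [pvMem_enum]; exact ⟨h0, by omega, rfl⟩
    · rw [if_pos (show (p.1, PySem.List.pyGetD s p.1 ("", "")).2.2 = "adj" from h4), List.mem_map]
      refine ⟨p.2, ?_, rfl⟩
      rw [List.mem_filter, PySem.List.mem_pyRange_one]
      simp only [PySem.List.len_eq, Bool.and_eq_true, beq_iff_eq]
      exact ⟨⟨by omega, by omega⟩, h5, h6⟩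

lemma pvPairwise_psA (t : String) (ws : Int) (s : List (String × String)) :
    (pvPsA t ws s).Pairwise pvLexA := by
  unfold pvPsA
  rw [List.pairwise_flatMap]
  constructor
  · intro ip _
    by_cases hc : ip.2.1 = t ∧ ip.2.2 = "n"
    · rw [if_pos hc, List.pairwise_map]
      exact (List.Pairwise.sublist List.filter_sublist
        (PySem.List.pairwise_lt_pyRange_one _ _)).imp (fun h => Or.inr ⟨rfl, h⟩)
    · rw [if_neg hc]; exact List.Pairwise.nil
  · rw [PySem.List.enumerate_eq_map_pyRange s ("", ""), List.pairwise_map]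
    refine (PySem.List.pairwise_lt_pyRange_one 0 (PySem.List.len s)).imp ?_
    intro j j' hjj a ha b hb
    have ha2 : a.2 = j := by
      split at ha
      · obtain ⟨w, _, rfl⟩ := List.mem_map.mp ha; rfl
      · exact absurd ha (List.not_mem_nil)
    have hb2 : b.2 = j' := by
      split at hb
      · obtain ⟨w, _, rfl⟩ := List.mem_map.mp hb; rfl
      · exact absurd hb (List.not_mem_nil)
    exact Or.inl (by omega)

lemma pvPairwise_psB (t : String) (ws : Int) (s : List (String × String)) :
    (pvPsB t ws s).Pairwise pvLexB := by
  unfold pvPsB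
  rw [List.pairwise_flatMap]
  constructor
  · intro jp _
    by_cases hc : jp.2.2 = "adj"
    · rw [if_pos hc, List.pairwise_map]
      exact (List.Pairwise.sublist List.filter_sublist
        (PySem.List.pairwise_lt_pyRange_one _ _)).imp (fun h => Or.inr ⟨rfl, h⟩)
    · rw [if_neg hc]; exact List.Pairwise.nil
  · rw [PySem.List.enumerate_eq_map_pyRange s ("", ""), List.pairwise_map]
    refine (PySem.List.pairwise_lt_pyRange_one 0 (PySem.List.len s)).imp ?_
    intro j j' hjj a ha b hb
    have ha1 : a.1 = j := by
      split at ha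
      · obtain ⟨w, _, rfl⟩ := List.mem_map.mp ha; rfl
      · exact absurd ha (List.not_mem_nil)
    have hb1 : b.1 = j' := by
      split at hb
      · obtain ⟨w, _, rfl⟩ := List.mem_map.mp hb; rfl
      · exact absurd hb (List.not_mem_nil)
    exact Or.inl (by omega)

lemma pvClosure (t : String) (ws : Int) (s : List (String × String)) {j2 i2 j3 i3 : Int}
    (h1 : pvPairP t ws s j2 i2) (h2 : pvPairP t ws s j3 i3) (hj : j2 < j3) (hi : i3 < i2) :
    pvPairP t ws s j2 i3 := by
  unfold pvPairP at *
  refine ⟨h1.1, by omega, by omega, by omega, h1.2.2.2.2.1, h2.2.2.2.2.2.1, h2.2.2.2.2.2.2⟩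

lemma pvNodup_psA (t : String) (ws : Int) (s : List (String × String)) : (pvPsA t ws s).Nodup := by
  exact (pvPairwise_psA t ws s).imp (fun h => by
    rintro rfl
    unfold pvLexA at h
    omega)

lemma pvNodup_psB (t : String) (ws : Int) (s : List (String × String)) : (pvPsB t ws s).Nodup := by
  exact (pvPairwise_psB t ws s).imp (fun h => by
    rintro rfl
    unfold pvLexB at h
    omega)

lemma pvPerm_ps (t : String) (ws : Int) (s : List (String × String)) :
    (pvPsA t ws s).Perm (pvPsB t ws s) := by
  rw [List.perm_ext_iff_of_nodup (pvNodup_psA t ws s) (pvNodup_psB t ws s)]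
  intro p
  rw [pvMem_psA, pvMem_psB]

-- characterization of pvPrec on the key list of a sorted pair list
lemma pvPrec_map_iff {r : Int × Int → Int × Int → Prop}
    (hasym : ∀ p q, r p q → r q p → False)
    (ps : List (Int × Int)) (g : Int → String) (a b : String) (hab : a ≠ b)
    (hps : ps.Pairwise r) :
    pvPrec (ps.map (fun p => g p.1)) a b ↔
      ∃ p ∈ ps, g p.1 = a ∧ ∀ q ∈ ps, g q.1 = b → r p q := by
  induction ps with
  | nil => simp [pvPrec]
  | cons p0 ps ih =>
      obtain ⟨hhead, htail⟩ := List.pairwise_cons.mp hps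
      rw [List.map_cons]
      show (g p0.1 = a ∨ (g p0.1 ≠ b ∧ pvPrec (ps.map (fun p => g p.1)) a b)) ↔ _
      by_cases h0a : g p0.1 = a
      · apply iff_of_true (Or.inl h0a)
        refine ⟨p0, List.mem_cons_self, h0a, ?_⟩
        intro q hq hqb
        rw [List.mem_cons] at hq
        rcases hq with rfl | hq
        · exact absurd (h0a ▸ hqb) hab
        · exact hhead q hq
      · by_cases h0b : g p0.1 = b
        · apply iff_of_false
          · rintro (h | ⟨hne, _⟩)
            · exact h0a h
            · exact hne h0b
          · rintro ⟨p, hp, hpa, hall⟩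
            rw [List.mem_cons] at hp
            rcases hp with rfl | hp
            · exact h0a hpa
            · exact hasym p p0 (hall p0 List.mem_cons_self h0b) (hhead p hp)
        · rw [ih htail]
          constructor
          · rintro (h | ⟨_, p, hp, hpa, hall⟩)
            · exact absurd h h0a
            · refine ⟨p, List.mem_cons_of_mem _ hp, hpa, ?_⟩
              intro q hq hqb
              rw [List.mem_cons] at hq
              rcases hq with rfl | hq
              · exact absurd hqb h0b
              · exact hall q hq hqb
          · rintro ⟨p, hp, hpa, hall⟩
            rw [List.mem_cons] at hp
            rcases hp with rfl | hp
            · exact absurd hpa h0a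
            · exact Or.inr ⟨h0b, p, hp, hpa,
                fun q hq hqb => hall q (List.mem_cons_of_mem _ hq) hqb⟩

-- two nodup lists with the same members, both sorted by an asymmetric relation, are equal
lemma pvEq_of_pairwise {α : Type} (r : α → α → Prop)
    (hasym : ∀ a b, r a b → r b a → False) :
    ∀ l1 l2 : List α, l1.Nodup → l2.Nodup → (∀ a, a ∈ l1 ↔ a ∈ l2) →
      l1.Pairwise r → l2.Pairwise r → l1 = l2 := by
  intro l1
  induction l1 with
  | nil =>
      intro l2 _ _ hm _ _
      cases l2 with
      | nil => rfl
      | cons y ys => exact absurd ((hm y).mpr List.mem_cons_self) (List.not_mem_nil)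
  | cons x xs ih =>
      intro l2 h1 h2 hm hp1 hp2
      cases l2 with
      | nil => exact absurd ((hm x).mp List.mem_cons_self) (List.not_mem_nil)
      | cons y ys =>
          have hxy : x = y := by
            by_contra hne
            have hxl2 : x ∈ y :: ys := (hm x).mp List.mem_cons_self
            have hyl1 : y ∈ x :: xs := (hm y).mpr List.mem_cons_self
            rw [List.mem_cons] at hxl2 hyl1
            have hx : x ∈ ys := by
              rcases hxl2 with h | h
              · exact absurd h hne
              · exact h
            have hy : y ∈ xs := by
              rcases hyl1 with h | h
              · exact absurd h.symm hne
              · exact h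
            exact hasym x y ((List.pairwise_cons.mp hp1).1 y hy) ((List.pairwise_cons.mp hp2).1 x hx)
          subst hxy
          have hxs : ∀ a, a ∈ xs ↔ a ∈ ys := by
            intro a
            constructor
            · intro ha
              have hmm : a ∈ x :: ys := (hm a).mp (List.mem_cons_of_mem _ ha)
              rw [List.mem_cons] at hmm
              rcases hmm with rfl | h
              · exact absurd ha (List.nodup_cons.mp h1).1
              · exact h
            · intro ha
              have hmm : a ∈ x :: xs := (hm a).mpr (List.mem_cons_of_mem _ ha)
              rw [List.mem_cons] at hmm
              rcases hmm with rfl | h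
              · exact absurd ha (List.nodup_cons.mp h2).1
              · exact h
          exact congrArg _ (ih ys (List.nodup_cons.mp h1).2 (List.nodup_cons.mp h2).2 hxs
            (List.pairwise_cons.mp hp1).2 (List.pairwise_cons.mp hp2).2)

lemma pvPairwise_prec_ofList (xs : List String) :
    (PySem.Set.ofList xs).Pairwise (fun a b => a ≠ b ∧ pvPrec xs a b) := by
  induction xs with
  | nil => simp [PySem.Set.ofList_nil]
  | cons x xs ih =>
      rw [PySem.Set.ofList_cons, List.pairwise_cons]
      constructor
      · intro b hb
        rw [PySem.Set.mem_discard] at hb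
        exact ⟨(Ne.symm hb.2), Or.inl rfl⟩
      · have hsub : ((PySem.Set.ofList xs).discard x).Sublist (PySem.Set.ofList xs) := by
          unfold PySem.Set.discard
          exact List.filter_sublist
        have hp := ih.sublist hsub
        refine hp.imp_of_mem ?_
        intro a b ha hb hab
        rw [PySem.Set.mem_discard] at ha hb
        exact ⟨hab.1, Or.inr ⟨Ne.symm hb.2, hab.2⟩⟩

-- the exchange argument: B-order first occurrence implies A-order first occurrence
lemma pvExchange (t : String) (ws : Int) (s : List (String × String)) (a b : String) (hab : a ≠ b)
    (h : ∃ p ∈ pvPsB t ws s, pvLem s p.1 = a ∧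
          ∀ q ∈ pvPsB t ws s, pvLem s q.1 = b → pvLexB p q) :
    ∃ p ∈ pvPsA t ws s, pvLem s p.1 = a ∧
      ∀ q ∈ pvPsA t ws s, pvLem s q.1 = b → pvLexA p q := by
  obtain ⟨p, hpB, hpa, hall⟩ := h
  have hpA : p ∈ pvPsA t ws s := (pvMem_psA t ws s p).mpr ((pvMem_psB t ws s p).mp hpB)
  cases hPb : (pvPsA t ws s).filter (fun q => pvLem s q.1 == b) with
  | nil =>
      refine ⟨p, hpA, hpa, ?_⟩
      intro q hq hqb
      exfalso
      have : q ∈ (pvPsA t ws s).filter (fun q => pvLem s q.1 == b) :=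
        List.mem_filter.mpr ⟨hq, beq_iff_eq.mpr hqb⟩
      rw [hPb] at this
      exact absurd this (List.not_mem_nil)
  | cons qm rest =>
      have hqmf : qm ∈ (pvPsA t ws s).filter (fun q => pvLem s q.1 == b) := by
        rw [hPb]; exact List.mem_cons_self
      obtain ⟨hqmA, hqmb'⟩ := List.mem_filter.mp hqmf
      have hqmb : pvLem s qm.1 = b := beq_iff_eq.mp hqmb'
      have hflt : ((pvPsA t ws s).filter (fun q => pvLem s q.1 == b)).Pairwise pvLexA :=
        List.Pairwise.sublist List.filter_sublist (pvPairwise_psA t ws s)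
      have hmin : ∀ q ∈ pvPsA t ws s, pvLem s q.1 = b → q = qm ∨ pvLexA qm q := by
        intro q hq hqb
        have hqf : q ∈ (pvPsA t ws s).filter (fun q => pvLem s q.1 == b) :=
          List.mem_filter.mpr ⟨hq, beq_iff_eq.mpr hqb⟩
        rw [hPb, List.mem_cons] at hqf
        rcases hqf with rfl | hqf
        · exact Or.inl rfl
        · rw [hPb] at hflt
          exact Or.inr ((List.pairwise_cons.mp hflt).1 q hqf)
      have hBqm : pvLexB p qm := hall qm ((pvMem_psB t ws s qm).mpr ((pvMem_psA t ws s qm).mp hqmA)) hqmb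
      have hj : p.1 < qm.1 := by
        rcases hBqm with h | h
        · exact h
        · exact absurd (hpa ▸ hqmb ▸ congrArg (pvLem s) h.1 : a = b) hab
      by_cases hcase : pvLexA p qm
      · refine ⟨p, hpA, hpa, ?_⟩
        intro q hq hqb
        rcases hmin q hq hqb with rfl | hlex
        · exact hcase
        · unfold pvLexA at hcase hlex ⊢
          omega
      · have hi : qm.2 < p.2 := by
          unfold pvLexA at hcase
          omega
        have hP : pvPairP t ws s p.1 qm.2 :=
          pvClosure t ws s ((pvMem_psA t ws s p).mp hpA) ((pvMem_psA t ws s qm).mp hqmA) hj hi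
        refine ⟨(p.1, qm.2), (pvMem_psA t ws s (p.1, qm.2)).mpr hP, hpa, ?_⟩
        intro q hq hqb
        rcases hmin q hq hqb with rfl | hlex
        · exact Or.inr ⟨rfl, hj⟩
        · unfold pvLexA at hlex ⊢
          simp only [] at hlex ⊢
          omega

lemma pvCount_ev (t : String) (ws : Int) (s : List (String × String)) (k : String) :
    (pvEvA t ws s).count k = (pvEvB t ws s).count k := by
  rw [pvEvA_eq_map, pvEvB_eq_map]
  exact ((pvPerm_ps t ws s).map _).count_eq k

lemma pvOfList_ev (t : String) (ws : Int) (s : List (String × String)) :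
    PySem.Set.ofList (pvEvA t ws s) = PySem.Set.ofList (pvEvB t ws s) := by
  have hmemAB : ∀ k, k ∈ pvEvA t ws s ↔ k ∈ pvEvB t ws s := by
    intro k
    rw [pvEvA_eq_map, pvEvB_eq_map, List.mem_map, List.mem_map]
    constructor <;> rintro ⟨p, hp, rfl⟩
    · exact ⟨p, (pvMem_psB t ws s p).mpr ((pvMem_psA t ws s p).mp hp), rfl⟩
    · exact ⟨p, (pvMem_psA t ws s p).mpr ((pvMem_psB t ws s p).mp hp), rfl⟩
  apply pvEq_of_pairwise (fun a b => a ≠ b ∧ pvPrec (pvEvA t ws s) a b)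
  · intro a b h1 h2
    exact pvPrec_asymm h1.1 h1.2 h2.2
  · exact PySem.Set.nodup_ofList _
  · exact PySem.Set.nodup_ofList _
  · intro a
    rw [PySem.Set.mem_ofList, PySem.Set.mem_ofList, hmemAB]
  · exact pvPairwise_prec_ofList _
  · refine (pvPairwise_prec_ofList (pvEvB t ws s)).imp_of_mem ?_
    intro a b _ _ hab
    refine ⟨hab.1, ?_⟩
    have hasymA : ∀ p q, pvLexA p q → pvLexA q p → False := by
      intro p q h1 h2
      unfold pvLexA at h1 h2
      omega
    have hasymB : ∀ p q, pvLexB p q → pvLexB q p → False := by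
      intro p q h1 h2
      unfold pvLexB at h1 h2
      omega
    have hB := hab.2
    rw [pvEvB_eq_map] at hB
    rw [pvPrec_map_iff hasymB _ (pvLem s) a b hab.1 (pvPairwise_psB t ws s)] at hB
    rw [pvEvA_eq_map,
      pvPrec_map_iff hasymA _ (pvLem s) a b hab.1 (pvPairwise_psA t ws s)]
    exact pvExchange t ws s a b hab.1 hB

-- ---- corpus level ----
lemma pvOfList_append_congr (xs xs' ys ys' : List String)
    (h1 : PySem.Set.ofList xs = PySem.Set.ofList xs')
    (h2 : PySem.Set.ofList ys = PySem.Set.ofList ys') :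
    PySem.Set.ofList (xs ++ ys) = PySem.Set.ofList (xs' ++ ys') := by
  rw [PySem.Set.ofList_append, PySem.Set.ofList_append,
    PySem.Set.update_eq_append_filter, PySem.Set.update_eq_append_filter, h1, h2]

lemma pvCnt_eq (es fs : List String)
    (h1 : PySem.Set.ofList es = PySem.Set.ofList fs)
    (h2 : ∀ k, es.count k = fs.count k) :
    pvCnt PySem.Dict.empty es = pvCnt PySem.Dict.empty fs := by
  apply PySem.Dict.ext
  have hnd : ∀ gs : List String, (pvCnt PySem.Dict.empty gs).keys.Nodup := by
    intro gs
    exact PySem.Dict.nodup_keys_foldl_insert gs (fun d x => d.getD x 0 + 1) _ PySem.Dict.nodup_keys_empty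
  rw [PySem.Dict.items_eq_map_keys _ (hnd es) 0, PySem.Dict.items_eq_map_keys _ (hnd fs) 0]
  have hk : ∀ gs : List String, (pvCnt PySem.Dict.empty gs).keys = PySem.Set.ofList gs := by
    intro gs
    unfold pvCnt
    rw [PySem.Dict.keys_foldl_insert gs (fun d x => d.getD x 0 + 1) _]
    rw [PySem.Dict.keys_empty, PySem.Set.update_nil_left]
  have hg : ∀ (gs : List String) (k : String),
      (pvCnt PySem.Dict.empty gs).getD k 0 = (gs.count k : Int) := by
    intro gs k
    unfold pvCnt
    rw [PySem.Dict.getD_foldl_insert_add_one, PySem.Dict.getD_empty, zero_add]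
  rw [hk, hk, h1]
  apply List.map_congr_left
  intro k _
  rw [hg, hg, h2]

lemma pvOfList_corpus (t : String) (ws : Int) (corpus : List (List (String × String))) :
    PySem.Set.ofList (corpus.flatMap (pvEvA t ws)) =
      PySem.Set.ofList (corpus.flatMap (pvEvB t ws)) := by
  induction corpus with
  | nil => rfl
  | cons s rest ih =>
      simp only [List.flatMap_cons]
      exact pvOfList_append_congr _ _ _ _ (pvOfList_ev t ws s) ih

lemma pvCount_corpus (t : String) (ws : Int) (corpus : List (List (String × String))) (k : String) :
    (corpus.flatMap (pvEvA t ws)).count k = (corpus.flatMap (pvEvB t ws)).count k := by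
  induction corpus with
  | nil => rfl
  | cons s rest ih =>
      simp only [List.flatMap_cons, List.count_append, ih, pvCount_ev t ws s k]

lemma pvTokA (t : String) (ws : Int) (s : List (String × String)) :
    ∀ (l : List (Int × (String × String))) (st : PySem.Dict String Int × PySem.Dict String Int),
      l.foldl (fun st2 ip =>
        (st2.1.insert ip.2.1 (st2.1.getD ip.2.1 0 + 1),
         if ip.2.1 = t ∧ ip.2.2 = "n" then
           (PySem.List.pyRange (max 0 (ip.1 - ws)) ip.1).foldl (fun c j =>
             match PySem.List.pyGet? s j with
             | some q => if q.2 = "adj" then c.insert q.1 (c.getD q.1 0 + 1) else c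
             | none => c) st2.2
         else st2.2)) st
      = (l.foldl (fun u ip => u.insert ip.2.1 (u.getD ip.2.1 0 + 1)) st.1,
         pvCnt st.2 (l.flatMap (pvInnerA t ws s))) := by
  intro l
  induction l with
  | nil => intro st; exact Prod.mk.eta.symm
  | cons ip l ih =>
      intro st
      rw [List.foldl_cons, List.foldl_cons, ih, List.flatMap_cons]
      unfold pvCnt
      rw [List.foldl_append]
      refine Prod.ext rfl ?_
      dsimp only
      congr 1
      unfold pvInnerA
      by_cases hc : ip.2.1 = t ∧ ip.2.2 = "n"
      · rw [if_pos hc, if_pos hc, List.foldl_filterMap]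
        apply PySem.List.foldl_congr_mem
        intro c j _
        cases hq : PySem.List.pyGet? s j with
        | none => simp
        | some q => by_cases h : q.2 = "adj" <;> simp [h]
      · rw [if_neg hc, if_neg hc]
        rfl

-- ---- port A decomposition ----
lemma pvPortA_eq (corpus : List (List (String × String))) (tn : String) (ws : Int) :
    find_collocations corpus tn ws =
      ((corpus.foldl (fun u sentence =>
          (PySem.List.enumerate sentence).foldl
            (fun u ip => u.insert ip.2.1 (u.getD ip.2.1 0 + 1)) u) PySem.Dict.empty).items,
       (pvCnt PySem.Dict.empty
          (corpus.flatMap (pvEvA (PySem.Str.strip (PySem.Str.lower tn)) ws))).items) := by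
  simp only [find_collocations]
  have hsent : ∀ (cs : List (List (String × String))) (st : PySem.Dict String Int × PySem.Dict String Int),
      cs.foldl (fun st sentence =>
        (PySem.List.enumerate sentence).foldl (fun st2 ip =>
          (st2.1.insert ip.2.1 (st2.1.getD ip.2.1 0 + 1),
           if ip.2.1 = PySem.Str.strip (PySem.Str.lower tn) ∧ ip.2.2 = "n" then
             (PySem.List.pyRange (max 0 (ip.1 - ws)) ip.1).foldl (fun c j =>
               match PySem.List.pyGet? sentence j with
               | some q => if q.2 = "adj" then c.insert q.1 (c.getD q.1 0 + 1) else c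
               | none => c) st2.2
           else st2.2)) st) st
      = (cs.foldl (fun u sentence =>
            (PySem.List.enumerate sentence).foldl
              (fun u ip => u.insert ip.2.1 (u.getD ip.2.1 0 + 1)) u) st.1,
         cs.foldl (fun c sentence => pvCnt c (pvEvA (PySem.Str.strip (PySem.Str.lower tn)) ws sentence)) st.2) := by
    intro cs
    induction cs with
    | nil => intro st; exact Prod.mk.eta.symm
    | cons sentence cs ih =>
        intro st
        rw [List.foldl_cons, List.foldl_cons, List.foldl_cons,
          pvTokA (PySem.Str.strip (PySem.Str.lower tn)) ws sentence (PySem.List.enumerate sentence) st, ih]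
        rfl
  rw [hsent]
  refine congrArg _ (congrArg _ ?_)
  show (List.foldl (fun c sentence => pvCnt c (pvEvA (PySem.Str.strip (PySem.Str.lower tn)) ws sentence)) PySem.Dict.empty corpus) = _
  unfold pvCnt
  rw [List.foldl_flatMap]

-- ---- port B decomposition ----

-- folding the second components of an enumeration is folding the list itself
lemma pvFoldl_enum_snd {β : Type} (f : β → String × String → β) :
    ∀ (s : List (String × String)) (k : Int) (u : β),
      (PySem.List.enumerate s k).foldl (fun u ip => f u ip.2) u = s.foldl f u := by
  intro s
  induction s with
  | nil => intro k u; rfl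
  | cons x xs ih =>
      intro k u
      rw [PySem.List.enumerate_cons, List.foldl_cons, List.foldl_cons, ih]

-- the window slice, read through indices: range-over-getD equals take-of-drop
lemma pvRange_map_getD (s : List (String × String)) (a b : Int) (ha : 0 ≤ a) (hb : 0 ≤ b) :
    (PySem.List.pyRange a (min (PySem.List.len s) b) 1).map
        (fun i => PySem.List.pyGetD s i ("", ""))
      = (s.take b.toNat).drop a.toNat := by
  have hlen : (PySem.List.len (s.take b.toNat)) = min (PySem.List.len s) b := by
    simp only [PySem.List.len_eq, List.length_take]
    omega
  have hmapc : (PySem.List.pyRange a (min (PySem.List.len s) b) 1).map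
        (fun i => PySem.List.pyGetD s i ("", ""))
      = (PySem.List.pyRange a (PySem.List.len (s.take b.toNat)) 1).map
        (fun i => PySem.List.pyGetD (s.take b.toNat) i ("", "")) := by
    rw [hlen]
    apply List.map_congr_left
    intro i hi
    rw [PySem.List.mem_pyRange_one] at hi
    have h0 : 0 ≤ i := le_trans ha hi.1
    have h2 : i < min (PySem.List.len s) b := hi.2
    simp only [PySem.List.len_eq] at h2
    rw [PySem.List.pyGetD_of_nonneg _ _ h0, PySem.List.pyGetD_of_nonneg _ _ h0]
    rw [List.getD_eq_getElem _ _ (by omega), List.getD_eq_getElem _ _ (by simp [List.length_take]; omega)]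
    rw [List.getElem_take]
  rw [hmapc, PySem.List.map_pyGetD_pyRange _ _ ha]

-- Source B's adjective events coincide with the index-driven event list pvEvB
lemma pvAdjEvents_eq (t : String) (ws : Int) (s : List (String × String)) :
    pvAdjEvents s t ws = pvEvB t ws s := by
  unfold pvAdjEvents pvEvB
  by_cases hws : 0 < ws
  · rw [if_pos hws]
    apply List.flatMap_congr
    intro jp hjp
    rw [pvMem_enum] at hjp
    unfold pvInnerB
    by_cases hc : jp.2.2 = "adj"
    · rw [if_pos hc, if_pos hc]
      have hslice : PySem.List.slice s (some (jp.1 + 1)) (some (jp.1 + 1 + ws))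
          = (s.take (jp.1 + 1 + ws).toNat).drop (jp.1 + 1).toNat := by
        have h1 : jp.1 + 1 = (((jp.1 + 1).toNat : Nat) : Int) := by omega
        have h2 : jp.1 + 1 + ws = (((jp.1 + 1 + ws).toNat : Nat) : Int) := by omega
        rw [h2, h1, PySem.List.slice_natCast]
        simp only [List.drop_take]
        congr 1
      rw [hslice, ← pvRange_map_getD s (jp.1 + 1) (jp.1 + 1 + ws) (by omega) (by omega),
        List.filterMap_map]
      symm
      apply List.filterMap_congr
      intro i hi
      rw [PySem.List.mem_pyRange_one] at hi
      have h0 : (0:Int) ≤ i := by omega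
      have h1 : i < (s.length : Int) := by
        have := hi.2
        simp only [PySem.List.len_eq] at this
        omega
      rw [pvGet_eq s i h0 h1]
      rfl
    · rw [if_neg hc, if_neg hc]
  · rw [if_neg hws]
    symm
    rw [List.flatMap_eq_nil_iff]
    intro jp _
    unfold pvInnerB
    by_cases hc : jp.2.2 = "adj"
    · rw [if_pos hc]
      rw [PySem.List.pyRange_one_eq_nil (by simp only [PySem.List.len_eq]; omega)]
      rfl
    · rw [if_neg hc]

lemma pvPortB_eq (corpus : List (List (String × String))) (tn : String) (ws : Int) :
    find_collocations_alt corpus tn ws =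
      ((corpus.foldl (fun u sentence =>
          (PySem.List.enumerate sentence).foldl
            (fun u ip => u.insert ip.2.1 (u.getD ip.2.1 0 + 1)) u) PySem.Dict.empty).items,
       (pvCnt PySem.Dict.empty
          (corpus.flatMap (pvEvB (PySem.Str.strip (PySem.Str.lower tn)) ws))).items) := by
  simp only [find_collocations_alt]
  refine congrArg₂ Prod.mk (congrArg _ ?_) (congrArg _ ?_)
  · unfold pvCountOf
    rw [List.foldl_flatMap]
    apply PySem.List.foldl_congr_mem
    intro u s _
    unfold pvLemmasOf
    rw [List.foldl_map]
    exact (pvFoldl_enum_snd (fun u p => u.insert p.1 (u.getD p.1 0 + 1)) s 0 u).symm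
  · unfold pvCountOf pvCnt
    refine congrArg _ ?_
    apply List.flatMap_congr
    intro s _
    exact pvAdjEvents_eq (PySem.Str.strip (PySem.Str.lower tn)) ws s

-- ===== VERDICT (by name: the statement is the Claim_ definition above) =====
theorem find_collocations_spec : Claim_equal_find_collocations := by
  intro corpus target_noun window_size hD
  unfold Spec_find_collocations
  rw [pvPortA_eq, pvPortB_eq,
    pvCnt_eq _ _ (pvOfList_corpus _ _ corpus) (fun k => pvCount_corpus _ _ corpus k)]
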